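-- pv_equiv track=rewrite | github.com/derRuedi/Advent-of-Code | 2015/day15.py | mixtures
-- ===== SOURCE A (Python) =====
-- def mixtures(total):
--     mixtures = []
--     for i in range(total + 1):
--         for j in range(0, total + 1 - i):
--             for k in range(0, total + 1 - i - j):
--                 l = total - i - j - k
--                 mixtures.append([i, j, k, l])
--     return mixtures
-- ===== SOURCE B (Python) =====
-- def mixtures(total):
--     result = []
--
--     def compose(rem, parts, prefix):
--         if parts == 1:
--             result.append(prefix + [rem])
--             return
--         for v in range(rem + 1):
--             compose(rem - v, parts - 1, prefix + [v])
--
--     compose(total, 4, [])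
--     return result
-- ===== Notes on version B (the rewrite author's own statement) =====
-- stated objective: alternative
-- what changed: Replaced the fixed triple-nested loops appending [i,j,k,l] with a general recursive compose(rem, parts, prefix) helper that forces the last part as the remainder, emitting the same lexicographic order.
import Mathlib
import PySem

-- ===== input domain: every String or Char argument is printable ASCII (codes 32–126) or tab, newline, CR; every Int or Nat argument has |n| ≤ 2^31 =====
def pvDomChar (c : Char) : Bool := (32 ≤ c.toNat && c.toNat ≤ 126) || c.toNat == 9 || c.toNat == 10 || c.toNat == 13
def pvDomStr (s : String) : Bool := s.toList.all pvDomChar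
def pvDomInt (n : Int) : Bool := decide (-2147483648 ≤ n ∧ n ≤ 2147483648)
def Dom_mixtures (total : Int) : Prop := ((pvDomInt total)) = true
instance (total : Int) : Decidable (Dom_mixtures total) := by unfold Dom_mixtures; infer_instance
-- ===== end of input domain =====

-- ===== PORT A =====
def mixtures (total : Int) : List (List Int) :=
  (PySem.List.pyRange 0 (total + 1) 1).foldl (fun acc i =>
    (PySem.List.pyRange 0 (total + 1 - i) 1).foldl (fun acc2 j =>
      (PySem.List.pyRange 0 (total + 1 - i - j) 1).foldl (fun acc3 k =>
        acc3 ++ [[i, j, k, total - i - j - k]]) acc2) acc) []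

-- ===== PORT B =====
-- recursive helper: parts_left = 1 emits prefix ++ [rem]; otherwise loops v over range(rem+1)
def mixturesCompose (rem : Int) (parts : Nat) (pre : List Int) : List (List Int) :=
  match parts with
  | 0 => []
  | 1 => [pre ++ [rem]]
  | n + 2 =>
    (PySem.List.pyRange 0 (rem + 1) 1).flatMap
      (fun v => mixturesCompose (rem - v) (n + 1) (pre ++ [v]))

def mixtures_alt (total : Int) : List (List Int) :=
  mixturesCompose total 4 []

-- ===== PRECONDITION & SPEC =====
def Spec_mixtures (total : Int) (out : List (List Int)) : Prop := out = mixtures_alt total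
instance (total : Int) (out : List (List Int)) : Decidable (Spec_mixtures total out) := by unfold Spec_mixtures; infer_instance

-- ===== CLAIM (what is proved, stated in full; the proofs are below) =====
def Claim_equal_mixtures : Prop := ∀ (total : Int), Dom_mixtures total → Spec_mixtures total (mixtures total)

-- ===== LEMMAS AND PROOFS =====

-- ===== VERDICT (by name: the statement is the Claim_ definition above) =====
theorem mixtures_spec : Claim_equal_mixtures := by
  intro total _
  unfold Spec_mixtures mixtures mixtures_alt
  simp only [mixturesCompose, PySem.List.foldl_append_eq_flatMap, List.nil_append]
  congr 1
  funext i
  have h1 : total + 1 - i = total - i + 1 := by ring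
  rw [h1]
  congr 1
  funext j
  have h2 : total - i + 1 - j = total - i - j + 1 := by ring
  rw [h2]
  simp
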